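-- pv_equiv track=rewrite | github.com/H9070/Soc-investigation-simulation | detection/rules.py | detect_suspicious_login
-- ===== SOURCE A (Python) =====
-- def detect_suspicious_login(logs):
--     """
--     Detect logins from external IPs (only one alert per IP)
--     """
--     alerts = []
--     seen_ips = set()  # keeps track of already alerted IPs
--
--     for line in logs:
--         if "Accepted password" in line:
--             try:
--                 ip = line.split("from ")[1].split(" ")[0]
--             except IndexError:
--                 continue
--
--             # Only alert once per external IP
--             if not ip.startswith("192.168") and ip not in seen_ips:
--                 alerts.append({
--                     "type": "Suspicious Login",
--                     "ip": ip,
--                     "message": f"Login from external IP {ip}"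
--                 })
--                 seen_ips.add(ip)
--
--     return alerts
-- ===== SOURCE B (Python) =====
-- def _external_ip(line):
--     """Return the external IP of an accepted-password line, else None."""
--     if "Accepted password" not in line:
--         return None
--     parts = line.split("from ")
--     if len(parts) < 2:
--         return None
--     ip = parts[1].split(" ")[0]
--     return None if ip.startswith("192.168") else ip
--
--
-- def detect_suspicious_login(logs):
--     # Phase 1: extract the external IPs in log order.
--     ips = [ip for ip in (_external_ip(l) for l in logs) if ip is not None]
--     # Phase 2: dedup by PURGING — take the head, drop every later copy, repeat.
--     # No seen-set: uniqueness comes from deleting each IP from the rest of the list.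
--     alerts = []
--     while ips:
--         ip = ips[0]
--         ips = [x for x in ips[1:] if x != ip]
--         alerts.append({"type": "Suspicious Login",
--                        "ip": ip,
--                        "message": f"Login from external IP {ip}"})
--     return alerts
-- ===== Notes on version B (the rewrite author's own statement) =====
-- stated objective: alternative
-- what changed: Replaces A's single scan with a seen-set by extract-then-purge: first collect the external IPs, then deduplicate by repeatedly taking the head IP and deleting all its later copies from the remaining list, so no membership structure is kept at all.
import Mathlib
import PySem

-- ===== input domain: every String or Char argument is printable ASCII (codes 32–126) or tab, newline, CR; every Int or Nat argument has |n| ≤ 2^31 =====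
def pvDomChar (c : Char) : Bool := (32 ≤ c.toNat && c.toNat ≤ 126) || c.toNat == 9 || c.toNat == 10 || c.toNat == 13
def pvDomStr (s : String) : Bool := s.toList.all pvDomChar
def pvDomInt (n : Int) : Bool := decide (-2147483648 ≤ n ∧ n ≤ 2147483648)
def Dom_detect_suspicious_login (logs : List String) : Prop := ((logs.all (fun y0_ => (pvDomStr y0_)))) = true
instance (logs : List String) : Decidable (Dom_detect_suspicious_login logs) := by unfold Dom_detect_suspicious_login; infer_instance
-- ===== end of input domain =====

-- B replaces A's single scan with a seen-set by extract-then-purge: collect the external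
-- IPs, then dedup by repeatedly taking the head and deleting its later copies; same return value.

-- ===== PORT A =====
-- s.split(sep) for a non-empty literal sep (split? is none only for sep = "", so getD is exact)
def pvSplit (s sep : String) : List String := (PySem.Str.split? s sep).getD []

-- x.split(" ")[0]: a split with a non-empty separator always yields at least one part, so [0] is exact
def pvFirstField (t : String) : String := (pvSplit t " ").headD ""

-- the alert dict literal (a dict is an association list in insertion order)
def pvMkAlert (ip : String) : List (String × String) :=
  [("type", "Suspicious Login"), ("ip", ip), ("message", "Login from external IP " ++ ip)]

-- one iteration of A's for-loop over the state (alerts, seen_ips)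
def pvStepA (st : List (List (String × String)) × PySem.Set String) (line : String) :
    List (List (String × String)) × PySem.Set String :=
  if PySem.Str.isIn "Accepted password" line then
    match PySem.List.pyGet? (pvSplit line "from ") 1 with
    | none => st   -- IndexError → continue
    | some t =>
      let ip := pvFirstField t
      if !(PySem.Str.startswith ip "192.168") && !(PySem.Set.contains st.2 ip) then
        (st.1 ++ [pvMkAlert ip], PySem.Set.add st.2 ip)
      else st
  else st

def detect_suspicious_login (logs : List String) : List (List (String × String)) :=
  (logs.foldl pvStepA ([], PySem.Set.empty)).1

-- ===== PORT B =====
-- Source B's _external_ip helper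
def pvExternalIp (line : String) : Option String :=
  if PySem.Str.isIn "Accepted password" line then
    let parts := pvSplit line "from "
    if parts.length < 2 then none
    else
      let ip := pvFirstField (parts.getD 1 "")
      if PySem.Str.startswith ip "192.168" then none else some ip
  else none

-- Source B's while-loop: take the head IP, drop its later copies, recurse on the rest
def pvPurge : List String → List String
  | [] => []
  | ip :: rest => ip :: pvPurge (rest.filter (fun x => x ≠ ip))
termination_by l => l.length
decreasing_by
  simp only [List.length_cons, List.length_unattach]
  exact Nat.lt_succ_of_le (le_trans (List.length_filter_le _ _) (by simp))

def detect_suspicious_login_alt (logs : List String) : List (List (String × String)) :=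
  let ips := logs.filterMap pvExternalIp
  (pvPurge ips).map pvMkAlert

-- ===== PRECONDITION & SPEC =====
def Spec_detect_suspicious_login (logs : List String) (out : List (List (String × String))) : Prop := out = detect_suspicious_login_alt logs
instance (logs : List String) (out : List (List (String × String))) : Decidable (Spec_detect_suspicious_login logs out) := by unfold Spec_detect_suspicious_login; infer_instance

-- ===== CLAIM (what is proved, stated in full; the proofs are below) =====
def Claim_equal_detect_suspicious_login : Prop := ∀ (logs : List String), Dom_detect_suspicious_login logs → Spec_detect_suspicious_login logs (detect_suspicious_login logs)

-- ===== LEMMAS AND PROOFS =====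

-- A's loop body, re-expressed through B's per-line candidate
theorem pvStepA_eq_cand (st : List (List (String × String)) × PySem.Set String) (line : String) :
    pvStepA st line =
      match pvExternalIp line with
      | none => st
      | some ip => if PySem.Set.contains st.2 ip then st
                   else (st.1 ++ [pvMkAlert ip], PySem.Set.add st.2 ip) := by
  unfold pvStepA pvExternalIp
  by_cases hin : PySem.Str.isIn "Accepted password" line
  · rw [if_pos hin, if_pos hin]
    rcases hg : PySem.List.pyGet? (pvSplit line "from ") 1 with _ | t
    · have hlt : (pvSplit line "from ").length < 2 := by
        have := (PySem.List.pyGet?_eq_none_iff _ _).mp hg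
        simp [PySem.Raise.InRange] at this
        omega
      rw [if_pos hlt]
    · have h1 : 1 < (pvSplit line "from ").length := by
        by_contra h
        have hn : PySem.List.pyGet? (pvSplit line "from ") 1 = none := by
          rw [PySem.List.pyGet?_eq_none_iff]
          simp [PySem.Raise.InRange]; omega
        rw [hn] at hg
        simp at hg
      have hle : ¬ (pvSplit line "from ").length < 2 := by omega
      have hget : (pvSplit line "from ").getD 1 "" = t := by
        have h2 := PySem.List.pyGet?_ofNat (xs := pvSplit line "from ") (n := 1) h1
        simp only [Nat.cast_one] at h2
        rw [hg] at h2
        rw [List.getD, List.getElem?_eq_getElem h1]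
        exact Option.some.inj h2.symm
      rw [if_neg hle, hget]
      change (if (!(PySem.Str.startswith (pvFirstField t) "192.168")
                  && !(PySem.Set.contains st.2 (pvFirstField t))) = true
              then (st.1 ++ [pvMkAlert (pvFirstField t)], PySem.Set.add st.2 (pvFirstField t))
              else st)
             = match (if PySem.Str.startswith (pvFirstField t) "192.168" = true
                      then none else some (pvFirstField t)) with
               | none => st
               | some ip => if PySem.Set.contains st.2 ip = true then st
                            else (st.1 ++ [pvMkAlert ip], PySem.Set.add st.2 ip)
      cases hsw : PySem.Str.startswith (pvFirstField t) "192.168"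
      · change (if (!false && !(PySem.Set.contains st.2 (pvFirstField t))) = true
                then (st.1 ++ [pvMkAlert (pvFirstField t)], PySem.Set.add st.2 (pvFirstField t))
                else st)
               = if PySem.Set.contains st.2 (pvFirstField t) = true then st
                 else (st.1 ++ [pvMkAlert (pvFirstField t)], PySem.Set.add st.2 (pvFirstField t))
        cases hc : PySem.Set.contains st.2 (pvFirstField t) <;> rfl
      · rfl
  · rw [if_neg hin, if_neg hin]

-- invariant of A's fold: alerts are exactly the seen set mapped to alert dicts,
-- and the final seen set is the initial one updated with B's extracted ips
theorem pvFold_inv (logs : List String) (s : PySem.Set String) :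
    logs.foldl pvStepA (s.map pvMkAlert, s) =
      ((PySem.Set.update s (logs.filterMap pvExternalIp)).map pvMkAlert,
        PySem.Set.update s (logs.filterMap pvExternalIp)) := by
  induction logs generalizing s with
  | nil => simp [PySem.Set.update]
  | cons line rest ih =>
    rw [List.foldl_cons, pvStepA_eq_cand]
    rcases hc : pvExternalIp line with _ | ip
    · simpa [List.filterMap_cons, hc] using ih s
    · simp only [List.filterMap_cons, hc]
      by_cases hmem : PySem.Set.contains s ip
      · have hmem' : ip ∈ s := by simpa using hmem
        have hadd : PySem.Set.add s ip = s := by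
          simp [PySem.Set.add, hmem']
        simp only [hmem, if_true, PySem.Set.update_cons, hadd]
        exact ih s
      · have hmem' : ip ∉ s := by simpa using hmem
        have hadd : PySem.Set.add s ip = s ++ [ip] := by
          simp [PySem.Set.add, hmem']
        simp only [hmem, if_false, Bool.false_eq_true, PySem.Set.update_cons]
        have := ih (PySem.Set.add s ip)
        rw [hadd] at this ⊢
        simpa [List.map_append] using this

-- A's set-based dedup equals B's purge-based dedup
theorem pvUpdate_eq_purge (l : List String) (s : PySem.Set String) :
    PySem.Set.update s l = s ++ pvPurge (l.filter (fun x => !(PySem.Set.contains s x))) := by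
  induction l generalizing s with
  | nil => simp [PySem.Set.update, pvPurge]
  | cons ip rest ih =>
    rw [PySem.Set.update_cons]
    by_cases hmem : PySem.Set.contains s ip
    · have hmem' : ip ∈ s := by simpa using hmem
      have hadd : PySem.Set.add s ip = s := by simp [PySem.Set.add, hmem']
      rw [hadd, ih s, List.filter_cons]
      simp [hmem']
    · have hmem' : ip ∉ s := by simpa using hmem
      have hadd : PySem.Set.add s ip = s ++ [ip] := by
        simp only [PySem.Set.add]; rw [if_neg hmem]
      rw [hadd, ih (s ++ [ip]), List.filter_cons]
      have hb : (!(PySem.Set.contains s ip)) = true := by simp [hmem']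
      rw [hb, if_pos rfl]
      have hfilt : rest.filter (fun x => !(PySem.Set.contains (s ++ [ip]) x))
          = (rest.filter (fun x => !(PySem.Set.contains s x))).filter (fun x => x ≠ ip) := by
        rw [List.filter_filter]
        apply List.filter_congr
        intro x _
        simp [PySem.Set.contains, Bool.not_or, Bool.and_comm]
      rw [hfilt, List.append_assoc]
      congr 1
      show [ip] ++ _ = pvPurge (ip :: _)
      rw [pvPurge]
      rfl

theorem pvUpdate_nil_eq_purge (l : List String) :
    PySem.Set.update ([] : PySem.Set String) l = pvPurge l := by
  have h := pvUpdate_eq_purge l []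
  simpa [PySem.Set.contains] using h

-- ===== VERDICT (by name: the statement is the Claim_ definition above) =====
theorem detect_suspicious_login_spec : Claim_equal_detect_suspicious_login := by
  intro logs _
  unfold Spec_detect_suspicious_login detect_suspicious_login detect_suspicious_login_alt
  show (List.foldl pvStepA ([], []) logs).1 = _
  have h := pvFold_inv logs []
  simp only [List.map_nil] at h
  rw [h, pvUpdate_nil_eq_purge]
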